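-- pv_equiv track=rewrite | github.com/m-kus/stone-signature-tutorial | scripts/generate_params.py | calculate_fri_step_list
-- ===== SOURCE A (Python) =====
-- def calculate_fri_step_list(desired_degree_bound: int, last_layer_degree_bound: int) -> list:
--     to_process = desired_degree_bound // last_layer_degree_bound
--
--     def highest_power_of_2_in(n):
--         power = 0
--
--         while n % 2 == 0:
--             n //= 2
--             power += 1
--
--         return power
--
--     fri_step_list = []
--     highest_power_of_2 = highest_power_of_2_in(to_process)
--
--     while True:
--         if highest_power_of_2 <= 4:
--             fri_step_list.append(highest_power_of_2)
--             break
--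
--         fri_step_list.append(4)
--         highest_power_of_2 = highest_power_of_2 - 4
--
--     return fri_step_list
-- ===== SOURCE B (Python) =====
-- def calculate_fri_step_list(desired_degree_bound: int, last_layer_degree_bound: int) -> list:
--     n = desired_degree_bound // last_layer_degree_bound
--     power = 0
--     while n != 0 and n % 2 == 0:
--         n //= 2
--         power += 1
--     q, r = divmod(power, 4)
--     return [4] * q + ([r] if r or power == 0 else [])
-- ===== Notes on version B (the rewrite author's own statement) =====
-- stated objective: simpler
-- what changed: The chunk-splitting while-loop is replaced by closed-form divmod arithmetic ([4]*q plus an [r] tail), and the valuation loop gains an n != 0 guard that makes B total where A diverges.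
import Mathlib
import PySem

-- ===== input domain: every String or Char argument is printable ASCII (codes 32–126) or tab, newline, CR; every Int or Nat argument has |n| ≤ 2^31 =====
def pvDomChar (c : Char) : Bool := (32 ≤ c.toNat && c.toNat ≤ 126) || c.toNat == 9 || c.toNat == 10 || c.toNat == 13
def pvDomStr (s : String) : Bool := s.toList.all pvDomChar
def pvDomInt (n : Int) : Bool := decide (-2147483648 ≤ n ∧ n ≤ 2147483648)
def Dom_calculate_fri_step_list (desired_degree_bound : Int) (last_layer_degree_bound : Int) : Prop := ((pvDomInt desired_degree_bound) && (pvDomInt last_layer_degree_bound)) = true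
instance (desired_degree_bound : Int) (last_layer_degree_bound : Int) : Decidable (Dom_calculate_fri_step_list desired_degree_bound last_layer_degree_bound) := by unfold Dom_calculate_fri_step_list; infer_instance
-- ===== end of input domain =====

-- B replaces A's chunk-splitting while-loop by closed-form divmod arithmetic (objective: simpler).

-- ===== PORT A =====
-- A's inner 'while n % 2 == 0' loop diverges at n = 0 (excluded by Pre_); the fuel
-- n.natAbs + 1 is a totality guard only: it exceeds the iteration count for every n ≠ 0.
def pvA_hp2loop : Nat → Int → Int → Int
  | 0, _, power => power
  | fuel + 1, n, power =>
    if PySem.Int.mod n 2 = 0 then pvA_hp2loop fuel (PySem.Int.floordiv n 2) (power + 1)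
    else power

-- the 'while True' chunk loop of A; the fuel h.toNat + 1 is a totality guard only
-- (the loop runs at most h/4 + 1 times)
def pvA_chunks : Nat → Int → List Int
  | 0, _ => []
  | fuel + 1, h => if h ≤ 4 then [h] else 4 :: pvA_chunks fuel (h - 4)

def calculate_fri_step_list (desired_degree_bound : Int) (last_layer_degree_bound : Int) : List Int :=
  let to_process := PySem.Int.floordiv desired_degree_bound last_layer_degree_bound
  let highest_power_of_2 := pvA_hp2loop (to_process.natAbs + 1) to_process 0
  pvA_chunks (highest_power_of_2.toNat + 1) highest_power_of_2

-- ===== PORT B =====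
-- B's valuation loop 'while n != 0 and n % 2 == 0' terminates on every n; the fuel
-- n.natAbs + 1 is a totality guard only (the loop runs at most log2 |n| + 1 times)
def pvB_val : Nat → Int → Int → Int
  | 0, _, power => power
  | fuel + 1, n, power =>
    if n ≠ 0 ∧ PySem.Int.mod n 2 = 0 then pvB_val fuel (PySem.Int.floordiv n 2) (power + 1)
    else power

def calculate_fri_step_list_alt (desired_degree_bound : Int) (last_layer_degree_bound : Int) : List Int :=
  let n := PySem.Int.floordiv desired_degree_bound last_layer_degree_bound
  let power := pvB_val (n.natAbs + 1) n 0
  let q := PySem.Int.floordiv power 4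
  let r := PySem.Int.mod power 4
  List.replicate q.toNat 4 ++ (if r ≠ 0 ∨ power = 0 then [r] else [])

-- ===== PRECONDITION & SPEC =====
-- Pre_ excludes last_layer_degree_bound = 0 (Python A raises ZeroDivisionError) and
-- desired_degree_bound // last_layer_degree_bound = 0 (Python A's valuation loop diverges).
def Pre_calculate_fri_step_list (desired_degree_bound : Int) (last_layer_degree_bound : Int) : Prop :=
  last_layer_degree_bound ≠ 0 ∧ PySem.Int.floordiv desired_degree_bound last_layer_degree_bound ≠ 0
instance (desired_degree_bound : Int) (last_layer_degree_bound : Int) : Decidable (Pre_calculate_fri_step_list desired_degree_bound last_layer_degree_bound) := by unfold Pre_calculate_fri_step_list; infer_instance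

def pvWitness_calculate_fri_step_list : Int × Int := (16, 1)

def Spec_calculate_fri_step_list (desired_degree_bound : Int) (last_layer_degree_bound : Int) (out : List Int) : Prop := out = calculate_fri_step_list_alt desired_degree_bound last_layer_degree_bound
instance (desired_degree_bound : Int) (last_layer_degree_bound : Int) (out : List Int) : Decidable (Spec_calculate_fri_step_list desired_degree_bound last_layer_degree_bound out) := by unfold Spec_calculate_fri_step_list; infer_instance

-- ===== CLAIM (what is proved, stated in full; the proofs are below) =====
def Claim_equal_calculate_fri_step_list : Prop := ∀ (desired_degree_bound : Int) (last_layer_degree_bound : Int), Dom_calculate_fri_step_list desired_degree_bound last_layer_degree_bound → Pre_calculate_fri_step_list desired_degree_bound last_layer_degree_bound → Spec_calculate_fri_step_list desired_degree_bound last_layer_degree_bound (calculate_fri_step_list desired_degree_bound last_layer_degree_bound)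

-- ===== LEMMAS AND PROOFS =====

-- B's loop never decreases the accumulator
theorem pvB_val_ge (fuel : Nat) : ∀ (n power : Int), power ≤ pvB_val fuel n power := by
  induction fuel with
  | zero => intro n power; exact le_refl _
  | succ fuel ih =>
    intro n power
    rw [pvB_val]
    split
    · exact le_trans (by omega) (ih _ _)
    · exact le_refl _

-- A's valuation loop computes B's on n ≠ 0 (with the same fuel)
theorem pvA_hp2loop_eq (fuel : Nat) :
    ∀ (n power : Int), n ≠ 0 → pvA_hp2loop fuel n power = pvB_val fuel n power := by
  induction fuel with
  | zero => intro n power _; rfl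
  | succ fuel ih =>
    intro n power hn
    by_cases hm : PySem.Int.mod n 2 = 0
    · rcases (PySem.Int.mod_eq_zero_iff_dvd n 2).mp hm with ⟨c, hc⟩
      have hfd : PySem.Int.floordiv n 2 = c := by
        rw [PySem.Int.floordiv_eq_ediv_of_pos (by norm_num)]; omega
      rw [pvA_hp2loop, if_pos hm, pvB_val, if_pos ⟨hn, hm⟩, hfd]
      exact ih c (power + 1) (by omega)
    · rw [pvA_hp2loop, if_neg hm, pvB_val, if_neg (by tauto)]

-- A's chunk loop in closed form, for nonnegative h and sufficient fuel
theorem pvA_chunks_closed (fuel : Nat) :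
    ∀ (h : Int), 0 ≤ h → h < (fuel : Int) →
      pvA_chunks fuel h =
        List.replicate (PySem.Int.floordiv h 4).toNat 4 ++
          (if PySem.Int.mod h 4 ≠ 0 ∨ h = 0 then [PySem.Int.mod h 4] else []) := by
  induction fuel with
  | zero => intro h h0 hf; omega
  | succ fuel ih =>
    intro h h0 hf
    rw [PySem.Int.floordiv_eq_ediv_of_pos (by norm_num), PySem.Int.mod_eq_emod_of_pos (by norm_num)]
    by_cases hle : h ≤ 4
    · rw [pvA_chunks, if_pos hle]
      interval_cases h <;> simp
    · rw [pvA_chunks, if_neg hle]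
      rw [ih (h - 4) (by omega) (by omega),
        PySem.Int.floordiv_eq_ediv_of_pos (by norm_num), PySem.Int.mod_eq_emod_of_pos (by norm_num)]
      have hq : (h / 4).toNat = ((h - 4) / 4).toNat + 1 := by omega
      have hm : h % 4 = (h - 4) % 4 := by omega
      have hne : h ≠ 0 ∧ h - 4 ≠ 0 := by omega
      rw [hq, List.replicate_succ, hm]
      by_cases hr : (h - 4) % 4 = 0 <;> simp [hr, hne.1, hne.2]

-- ===== VERDICT (by name: the statement is the Claim_ definition above) =====
theorem calculate_fri_step_list_spec : Claim_equal_calculate_fri_step_list := by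
  intro d l _ hpre
  rcases hpre with ⟨-, hn⟩
  unfold Spec_calculate_fri_step_list calculate_fri_step_list calculate_fri_step_list_alt
  dsimp only
  rw [pvA_hp2loop_eq _ _ 0 hn]
  have h0 : 0 ≤ pvB_val ((PySem.Int.floordiv d l).natAbs + 1) (PySem.Int.floordiv d l) 0 :=
    pvB_val_ge _ _ 0
  exact pvA_chunks_closed _ _ h0 (by omega)
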